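-- pv_equiv track=rewrite | github.com/Raviteja72/Python | Revamp/py.py | check_rating
-- ===== SOURCE A (Python) =====
-- def check_rating(rating_list):
--     r_5,r_10 = [],[]
--     for i in rating_list:
--         if(i>=0 and i<=5):
--             r_5.append(i)
--         elif(i>=6 and i<=10):
--             r_10.append(i)
--         else:
--             return "Invalid Rating"
--     if(len(r_5) > len(r_10)):
--         return "The highest rating is for 0-5"
--     elif(len(r_10)>len(r_5)):
--         return "The highest rating is for 6-10"
--     else:
--         return "Ratings are equal"
-- ===== SOURCE B (Python) =====
-- def check_rating(rating_list):
--     if any(not (0 <= i <= 10) for i in rating_list):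
--         return "Invalid Rating"
--     r5 = sum(1 for i in rating_list if i <= 5)
--     if 2 * r5 > len(rating_list):
--         return "The highest rating is for 0-5"
--     if 2 * r5 < len(rating_list):
--         return "The highest rating is for 6-10"
--     return "Ratings are equal"
-- ===== Notes on version B (the rewrite author's own statement) =====
-- stated objective: simpler
-- what changed: Replaces A's single fused validate-and-bucket loop that appends elements to two lists with a validate-first pass (any) followed by a single count of the low bucket, deriving the verdict from 2*r5 vs len; no bucket lists are built.
import Mathlib
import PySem

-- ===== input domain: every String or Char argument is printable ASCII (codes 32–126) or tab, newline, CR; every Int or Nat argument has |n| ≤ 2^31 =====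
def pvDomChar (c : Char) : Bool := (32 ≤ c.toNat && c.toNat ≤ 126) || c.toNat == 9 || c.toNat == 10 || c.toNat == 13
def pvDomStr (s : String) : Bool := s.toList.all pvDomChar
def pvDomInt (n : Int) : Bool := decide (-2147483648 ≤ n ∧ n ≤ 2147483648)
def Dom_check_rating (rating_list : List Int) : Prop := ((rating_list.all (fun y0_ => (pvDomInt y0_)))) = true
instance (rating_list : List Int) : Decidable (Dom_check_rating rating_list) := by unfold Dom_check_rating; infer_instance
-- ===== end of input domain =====

-- B is simpler: validates first, then counts one bucket; no bucket lists built.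
-- ===== PORT A =====
def check_rating_loop : List Int → List Int → List Int → String
  | [], r_5, r_10 =>
    if r_5.length > r_10.length then "The highest rating is for 0-5"
    else if r_10.length > r_5.length then "The highest rating is for 6-10"
    else "Ratings are equal"
  | i :: rest, r_5, r_10 =>
    if 0 ≤ i ∧ i ≤ 5 then check_rating_loop rest (r_5 ++ [i]) r_10
    else if 6 ≤ i ∧ i ≤ 10 then check_rating_loop rest r_5 (r_10 ++ [i])
    else "Invalid Rating"

def check_rating (rating_list : List Int) : String :=
  check_rating_loop rating_list [] []

-- ===== PORT B =====
def check_rating_alt (rating_list : List Int) : String :=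
  if rating_list.any (fun i => !(decide (0 ≤ i) && decide (i ≤ 10))) then "Invalid Rating"
  else if 2 * rating_list.countP (fun i => decide (i ≤ 5)) > rating_list.length then
    "The highest rating is for 0-5"
  else if 2 * rating_list.countP (fun i => decide (i ≤ 5)) < rating_list.length then
    "The highest rating is for 6-10"
  else "Ratings are equal"

-- ===== PRECONDITION & SPEC =====
def Spec_check_rating (rating_list : List Int) (out : String) : Prop := out = check_rating_alt rating_list
instance (rating_list : List Int) (out : String) : Decidable (Spec_check_rating rating_list out) := by unfold Spec_check_rating; infer_instance

-- ===== CLAIM (what is proved, stated in full; the proofs are below) =====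
def Claim_equal_check_rating : Prop := ∀ (rating_list : List Int), Dom_check_rating rating_list → Spec_check_rating rating_list (check_rating rating_list)

-- ===== LEMMAS AND PROOFS =====
def pvVerdict (m n : Nat) : String :=
  if m > n then "The highest rating is for 0-5"
  else if n > m then "The highest rating is for 6-10"
  else "Ratings are equal"

lemma check_rating_loop_eq (l r5 r10 : List Int) :
    check_rating_loop l r5 r10 =
      if l.any (fun i => !(decide (0 ≤ i) && decide (i ≤ 10))) then "Invalid Rating"
      else pvVerdict (r5.length + l.countP (fun i => decide (0 ≤ i ∧ i ≤ 5)))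
                     (r10.length + l.countP (fun i => decide (6 ≤ i ∧ i ≤ 10))) := by
  induction l generalizing r5 r10 with
  | nil => simp [check_rating_loop, pvVerdict]
  | cons i rest ih =>
    by_cases h5 : 0 ≤ i ∧ i ≤ 5
    · have h10 : ¬ (6 ≤ i ∧ i ≤ 10) := by omega
      have hv : (!(decide (0 ≤ i) && decide (i ≤ 10))) = false := by
        simp only [Bool.not_eq_false', Bool.and_eq_true, decide_eq_true_eq]; omega
      have hstep : check_rating_loop (i :: rest) r5 r10
          = check_rating_loop rest (r5 ++ [i]) r10 := by
        simp only [check_rating_loop, if_pos h5]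
      have hcnt5 : List.countP (fun j => decide (0 ≤ j ∧ j ≤ 5)) (i :: rest)
          = List.countP (fun j => decide (0 ≤ j ∧ j ≤ 5)) rest + 1 := by
        simp [h5]
      have hcnt10 : List.countP (fun j => decide (6 ≤ j ∧ j ≤ 10)) (i :: rest)
          = List.countP (fun j => decide (6 ≤ j ∧ j ≤ 10)) rest := by
        simp [h10]
      rw [hstep, ih, List.any_cons, hv, Bool.false_or, hcnt5, hcnt10]
      split
      · rfl
      · congr 1
        simp only [List.length_append, List.length_cons, List.length_nil]
        omega
    · by_cases h10 : 6 ≤ i ∧ i ≤ 10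
      · have hv : (!(decide (0 ≤ i) && decide (i ≤ 10))) = false := by
          simp only [Bool.not_eq_false', Bool.and_eq_true, decide_eq_true_eq]; omega
        have hstep : check_rating_loop (i :: rest) r5 r10
            = check_rating_loop rest r5 (r10 ++ [i]) := by
          simp only [check_rating_loop, if_neg h5, if_pos h10]
        have hcnt5 : List.countP (fun j => decide (0 ≤ j ∧ j ≤ 5)) (i :: rest)
            = List.countP (fun j => decide (0 ≤ j ∧ j ≤ 5)) rest := by
          simp [h5]
        have hcnt10 : List.countP (fun j => decide (6 ≤ j ∧ j ≤ 10)) (i :: rest)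
            = List.countP (fun j => decide (6 ≤ j ∧ j ≤ 10)) rest + 1 := by
          simp [h10]
        rw [hstep, ih, List.any_cons, hv, Bool.false_or, hcnt5, hcnt10]
        split
        · rfl
        · congr 1
          simp only [List.length_append, List.length_cons, List.length_nil]
          omega
      · have hv : (!(decide (0 ≤ i) && decide (i ≤ 10))) = true := by
          simp only [Bool.not_eq_true', Bool.and_eq_false_iff, decide_eq_false_iff_not]
          omega
        have hstep : check_rating_loop (i :: rest) r5 r10 = "Invalid Rating" := by
          simp only [check_rating_loop, if_neg h5, if_neg h10]
        rw [hstep, List.any_cons, hv, Bool.true_or, if_pos rfl]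

-- ===== VERDICT (by name: the statement is the Claim_ definition above) =====
theorem check_rating_spec : Claim_equal_check_rating := by
  intro l _
  unfold Spec_check_rating check_rating check_rating_alt
  rw [check_rating_loop_eq]
  cases hinv : l.any (fun i => !(decide (0 ≤ i) && decide (i ≤ 10))) with
  | true => rfl
  | false =>
    rw [if_neg Bool.false_ne_true, if_neg Bool.false_ne_true]
    have hall : ∀ i ∈ l, 0 ≤ i ∧ i ≤ 10 := by
      intro i hi
      have h := List.any_eq_false.mp hinv i hi
      simp only [Bool.not_eq_true', Bool.and_eq_false_iff, decide_eq_false_iff_not] at h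
      omega
    have hc5 : l.countP (fun i => decide (0 ≤ i ∧ i ≤ 5))
        = l.countP (fun i => decide (i ≤ 5)) := by
      apply List.countP_congr
      intro i hi
      have := hall i hi
      simp only [decide_eq_true_eq]; omega
    have hlen : l.length = l.countP (fun i => decide (i ≤ 5))
        + l.countP (fun a => decide (5 < a)) := by
      simpa using List.length_eq_countP_add_countP (p := fun i : Int => decide (i ≤ 5)) (l := l)
    have hc10 : l.countP (fun i => decide (6 ≤ i ∧ i ≤ 10))
        = l.length - l.countP (fun i => decide (i ≤ 5)) := by
      have hcc : l.countP (fun i => decide (6 ≤ i ∧ i ≤ 10))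
          = l.countP (fun a => decide (5 < a)) := by
        apply List.countP_congr
        intro i hi
        have hx := hall i hi
        simp only [decide_eq_true_eq]; omega
      rw [hcc]; omega
    rw [hc5, hc10]
    unfold pvVerdict
    simp only [List.length_nil, Nat.zero_add]
    split_ifs <;> first | rfl | (exfalso; omega)
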